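-- pv_equiv track=rewrite | github.com/kkowenn/algorirhm-design | chatQuestion/Q28chat.py | minCostToMergeProjects
-- ===== SOURCE A (Python) =====
-- import heapq
--
-- def minCostToMergeProjects(projects):
--     # Initialize total cost to 0
--     total_cost = 0
--
--     # Create a min heap from the projects list
--     heapq.heapify(projects)
--
--     # Continue merging until we have one project left
--     while len(projects) > 1:
--         # Pop the two smallest projects
--         smallest = heapq.heappop(projects)
--         second_smallest = heapq.heappop(projects)
--
--         # The cost of merging these two projects
--         cost = smallest + second_smallest
--
--         # Add the cost to the total cost
--         total_cost += cost
--
--         # Push the merged project back into the min heap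
--         heapq.heappush(projects, cost)
--
--     return total_cost
-- ===== SOURCE B (Python) =====
-- def minCostToMergeProjects(projects):
--     # Same greedy (Huffman-style merging), but maintain a SORTED list instead of a heap:
--     # sort in place, repeatedly take the two smallest from the front and insert the
--     # merge cost back at its sorted position by a linear scan.
--     # Mutates `projects` in place, like A's heapify/heappop do.
--     projects.sort()
--     total_cost = 0
--     while len(projects) > 1:
--         cost = projects.pop(0) + projects.pop(0)
--         total_cost += cost
--         i = 0
--         while i < len(projects) and projects[i] <= cost:
--             i += 1
--         projects.insert(i, cost)
--     return total_cost
-- ===== Notes on version B (the rewrite author's own statement) =====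
-- stated objective: alternative
-- what changed: Replaces the binary min-heap with an explicitly maintained sorted list: sort once, pop the two smallest from the front, and reinsert each merge cost at its sorted position by a linear scan.
import Mathlib
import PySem

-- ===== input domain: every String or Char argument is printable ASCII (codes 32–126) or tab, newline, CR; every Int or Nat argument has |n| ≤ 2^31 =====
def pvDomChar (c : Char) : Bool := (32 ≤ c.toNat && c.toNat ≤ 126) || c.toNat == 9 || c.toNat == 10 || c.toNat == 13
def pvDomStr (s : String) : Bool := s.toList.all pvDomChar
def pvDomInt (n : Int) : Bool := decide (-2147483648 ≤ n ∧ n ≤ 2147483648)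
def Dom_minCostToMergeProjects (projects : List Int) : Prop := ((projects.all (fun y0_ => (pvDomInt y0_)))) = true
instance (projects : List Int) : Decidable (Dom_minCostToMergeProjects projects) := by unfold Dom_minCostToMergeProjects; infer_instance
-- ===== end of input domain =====

-- B replaces A's binary min-heap with an explicitly maintained sorted list (sort once,
-- pop the two smallest from the front, reinsert the merge cost at its sorted position);
-- equivalence is about the RETURN value only — both Pythons mutate `projects` in place.


-- ===== PORT A =====
-- heapq is modelled by its documented contract: the heap list is the multiset of pending
-- costs, heapify rearranges in place (identity on the multiset), heappop removes and
-- returns the smallest item, heappush appends the new item to the multiset.  Only the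
-- returned total is claimed; the internal array layout of CPython's heap is not modelled.
def pvHeappop (h : List Int) : Option (Int × List Int) :=
  match h.min? with
  | none => none
  | some m => some (m, h.erase m)

-- the `while len(projects) > 1` loop of A, recursing on the heap's length
def pvALoop (total : Int) (h : List Int) : Int :=
  if h.length ≤ 1 then total
  else
    match hp1 : pvHeappop h with
    | none => total          -- unreachable totality guard (h is nonempty here)
    | some (smallest, h1) =>
      match hp2 : pvHeappop h1 with
      | none => total        -- unreachable totality guard (h1 is nonempty here)
      | some (second, h2) =>
        let cost := smallest + second
        pvALoop (total + cost) (h2 ++ [cost])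
  termination_by h.length
  decreasing_by
    simp only [pvHeappop] at hp1 hp2
    rcases hm1 : h.min? with _ | m1 <;> rw [hm1] at hp1 <;> simp at hp1
    obtain ⟨rfl, rfl⟩ := hp1
    rcases hm2 : (h.erase m1).min? with _ | m2 <;> rw [hm2] at hp2 <;> simp at hp2
    obtain ⟨rfl, rfl⟩ := hp2
    have hmem1 : m1 ∈ h := List.min?_mem hm1
    have hmem2 : m2 ∈ h.erase m1 := List.min?_mem hm2
    have l1 := List.length_erase_of_mem hmem1
    have l2 := List.length_erase_of_mem hmem2
    simp [l1, l2]
    omega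

def minCostToMergeProjects (projects : List Int) : Int :=
  pvALoop 0 projects

-- ===== PORT B =====
-- the inner `while i < len(projects) and projects[i] <= cost` scan + insert of Source B:
-- walk past elements ≤ x and place x there
def pvInsort (x : Int) : List Int → List Int
  | [] => [x]
  | y :: ys => if x < y then x :: y :: ys else y :: pvInsort x ys

theorem pvInsort_length (x : Int) (l : List Int) :
    (pvInsort x l).length = l.length + 1 := by
  induction l with
  | nil => rfl
  | cons y ys ih => simp only [pvInsort]; split <;> simp [ih]

-- the `while len(projects) > 1` loop of Source B over the sorted list
def pvBLoop (total : Int) (s : List Int) : Int :=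
  match s with
  | a :: b :: rest => pvBLoop (total + (a + b)) (pvInsort (a + b) rest)
  | _ => total
  termination_by s.length
  decreasing_by simp [pvInsort_length]

def minCostToMergeProjects_alt (projects : List Int) : Int :=
  pvBLoop 0 (PySem.List.sorted projects (fun x => x))

-- ===== PRECONDITION & SPEC =====
def Spec_minCostToMergeProjects (projects : List Int) (out : Int) : Prop := out = minCostToMergeProjects_alt projects
instance (projects : List Int) (out : Int) : Decidable (Spec_minCostToMergeProjects projects out) := by unfold Spec_minCostToMergeProjects; infer_instance

-- ===== CLAIM (what is proved, stated in full; the proofs are below) =====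
def Claim_equal_minCostToMergeProjects : Prop := ∀ (projects : List Int), Dom_minCostToMergeProjects projects → Spec_minCostToMergeProjects projects (minCostToMergeProjects projects)

-- ===== LEMMAS AND PROOFS =====

theorem pvInsort_perm (x : Int) (l : List Int) : (pvInsort x l).Perm (x :: l) := by
  induction l with
  | nil => exact List.Perm.refl _
  | cons y ys ih =>
    simp only [pvInsort]
    split
    · exact List.Perm.refl _
    · exact (List.Perm.cons y ih).trans (List.Perm.swap x y ys)

theorem pvInsort_sorted (x : Int) (l : List Int)
    (hl : l.Pairwise (· ≤ ·)) : (pvInsort x l).Pairwise (· ≤ ·) := by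
  induction l with
  | nil => simp [pvInsort]
  | cons y ys ih =>
    rw [List.pairwise_cons] at hl
    simp only [pvInsort]
    split
    · rename_i hxy
      rw [List.pairwise_cons]
      refine ⟨?_, List.pairwise_cons.mpr hl⟩
      intro z hz
      rcases List.mem_cons.mp hz with rfl | hz'
      · exact le_of_lt hxy
      · exact le_trans (le_of_lt hxy) (hl.1 z hz')
    · rename_i hxy
      rw [not_lt] at hxy
      rw [List.pairwise_cons]
      refine ⟨?_, ih hl.2⟩
      intro z hz
      rcases List.mem_cons.mp ((pvInsort_perm x ys).mem_iff.mp hz) with rfl | hz'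
      · exact hxy
      · exact hl.1 z hz'

-- the minimum of the heap multiset is the head of its sorted arrangement
theorem min?_of_perm_sorted (h : List Int) (a : Int) (t : List Int)
    (hperm : h.Perm (a :: t)) (hsort : (a :: t).Pairwise (· ≤ ·)) :
    h.min? = some a := by
  rw [List.min?_eq_some_iff]
  constructor
  · exact hperm.mem_iff.mpr List.mem_cons_self
  · intro b hb
    rcases List.mem_cons.mp (hperm.mem_iff.mp hb) with rfl | hb'
    · exact le_refl _
    · exact (List.pairwise_cons.mp hsort).1 b hb'

-- the loop invariant: if the heap multiset equals the sorted list's multiset,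
-- A's heap loop and B's sorted-list loop return the same total
theorem loop_agree (n : ℕ) (h s : List Int) (total : Int)
    (hlen : h.length = n)
    (hperm : h.Perm s) (hsort : s.Pairwise (· ≤ ·)) :
    pvALoop total h = pvBLoop total s := by
  induction n using Nat.strong_induction_on generalizing h s total with
  | _ n ih =>
    have hslen : s.length = h.length := hperm.length_eq.symm
    by_cases hle : h.length ≤ 1
    · rw [pvALoop.eq_def, if_pos hle]
      cases s with
      | nil => rw [pvBLoop]; intro a b rest hcon; simp at hcon
      | cons a t =>
        cases t with
        | nil => rw [pvBLoop]; intro a' b rest hcon; simp at hcon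
        | cons b r => simp at hslen; omega
    · cases s with
      | nil => simp at hslen; omega
      | cons a t =>
        cases t with
        | nil => simp at hslen; omega
        | cons b rest =>
          have hmin1 : h.min? = some a := min?_of_perm_sorted h a (b :: rest) hperm hsort
          have hperm1 : (h.erase a).Perm (b :: rest) := by
            have := hperm.erase a
            simpa using this
          have hsort1 : (b :: rest).Pairwise (· ≤ ·) :=
            (List.pairwise_cons.mp hsort).2
          have hmin2 : (h.erase a).min? = some b :=
            min?_of_perm_sorted _ b rest hperm1 hsort1
          have hperm2 : ((h.erase a).erase b).Perm rest := by
            have := hperm1.erase b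
            simpa using this
          have hsort2 : rest.Pairwise (· ≤ ·) := (List.pairwise_cons.mp hsort1).2
          have hperm3 : (((h.erase a).erase b) ++ [a + b]).Perm (pvInsort (a + b) rest) :=
            ((hperm2.append_right _).trans List.perm_append_comm).trans
              (pvInsort_perm _ _).symm
          have hlen3 : (((h.erase a).erase b) ++ [a + b]).length = n - 1 := by
            have h1 := hperm3.length_eq
            rw [pvInsort_length] at h1
            have h2 : rest.length + 2 = n := by
              simpa using hslen.trans hlen
            omega
          rw [pvALoop.eq_def, if_neg hle]
          split
          · rename_i heq
            simp [pvHeappop, hmin1] at heq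
          · rename_i smallest h1 heq
            rw [pvHeappop, hmin1] at heq
            simp only [Option.some.injEq, Prod.mk.injEq] at heq
            obtain ⟨rfl, rfl⟩ := heq
            split
            · rename_i heq2
              simp [pvHeappop, hmin2] at heq2
            · rename_i second h2 heq2
              rw [pvHeappop, hmin2] at heq2
              simp only [Option.some.injEq, Prod.mk.injEq] at heq2
              obtain ⟨rfl, rfl⟩ := heq2
              rw [pvBLoop]
              exact ih (n - 1) (by omega) _ _ _ hlen3 hperm3 (pvInsort_sorted _ _ hsort2)

-- ===== VERDICT (by name: the statement is the Claim_ definition above) =====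
theorem minCostToMergeProjects_spec : Claim_equal_minCostToMergeProjects := by
  intro projects _
  unfold Spec_minCostToMergeProjects minCostToMergeProjects minCostToMergeProjects_alt
  exact loop_agree projects.length projects _ 0 rfl
    (PySem.List.sorted_perm projects (fun x => x) false).symm
    (PySem.List.sorted_pairwise projects (fun x => x))
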